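-- pv_equiv track=rewrite | github.com/alyx000/tradeSystem | scripts/db/dual_write.py | _normalize_stock_code_for_match
-- ===== SOURCE A (Python) =====
-- def _normalize_stock_code_for_match(code: str | None) -> str:
--     """用于匹配持仓代码：忽略交易所后缀与大小写。"""
--     if not code:
--         return ""
--     s = str(code).strip().upper()
--     for suf in (".SZ", ".SH", ".BJ"):
--         if s.endswith(suf):
--             return s[: -len(suf)]
--     return s
-- ===== SOURCE B (Python) =====
-- def _normalize_stock_code_for_match(code):
--     """用于匹配持仓代码：忽略交易所后缀与大小写。"""
--     if not code:
--         return ""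
--     chars = [c.upper() for c in str(code).strip()]
--     if len(chars) >= 3 and chars[-3:] in (list(".SZ"), list(".SH"), list(".BJ")):
--         del chars[-3:]
--     return "".join(chars)
-- ===== Notes on version B (the rewrite author's own statement) =====
-- stated objective: alternative
-- what changed: B works on a mutable character list instead of strings: it uppercases the stripped code character by character via a comprehension, inspects the last three characters once with a single tail comparison (no per-suffix endswith loop, no string slicing), deletes them in place when they form an exchange suffix, and joins the list back into a string.
import Mathlib
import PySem

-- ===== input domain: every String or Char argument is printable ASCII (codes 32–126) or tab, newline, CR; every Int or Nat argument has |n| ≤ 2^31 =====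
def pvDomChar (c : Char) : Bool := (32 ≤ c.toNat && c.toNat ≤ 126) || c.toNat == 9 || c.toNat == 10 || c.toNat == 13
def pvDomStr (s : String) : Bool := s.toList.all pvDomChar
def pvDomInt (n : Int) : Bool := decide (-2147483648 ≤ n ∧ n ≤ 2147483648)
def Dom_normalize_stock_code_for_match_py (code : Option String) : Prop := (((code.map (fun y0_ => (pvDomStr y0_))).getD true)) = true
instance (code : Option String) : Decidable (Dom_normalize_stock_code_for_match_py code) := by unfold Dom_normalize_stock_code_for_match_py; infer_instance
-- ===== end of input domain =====

-- B drops A's string-level endswith loop and per-suffix slicing: it uppercases the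
-- stripped code character by character into a list, inspects the last three
-- characters once, truncates the list in place, and joins (objective: alternative).

-- ===== PORT A =====
def normalize_stock_code_for_match_py (code : Option String) : String :=
  match code with
  | none => ""
  | some c =>
    if c = "" then ""
    else
      let s := PySem.Str.upper (PySem.Str.strip c)
      if PySem.Str.endswith s ".SZ" then PySem.Str.slice s none (some (-3))
      else if PySem.Str.endswith s ".SH" then PySem.Str.slice s none (some (-3))
      else if PySem.Str.endswith s ".BJ" then PySem.Str.slice s none (some (-3))
      else s

-- ===== PORT B =====
def normalize_stock_code_for_match_py_alt (code : Option String) : String :=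
  match code with
  | none => ""
  | some c =>
    if c = "" then ""
    else
      -- chars = [c.upper() for c in str(code).strip()]
      let chars := (PySem.Str.strip c).toList.map PySem.Chars.upperChar
      -- if len(chars) >= 3 and chars[-3:] in (…): del chars[-3:]   (what remains is chars[:-3])
      let chars :=
        if 3 ≤ chars.length ∧
            (PySem.List.slice chars (some (-3)) none = ['.', 'S', 'Z'] ∨
             PySem.List.slice chars (some (-3)) none = ['.', 'S', 'H'] ∨
             PySem.List.slice chars (some (-3)) none = ['.', 'B', 'J'])
        then PySem.List.slice chars none (some (-3))
        else chars
      String.ofList chars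

-- ===== PRECONDITION & SPEC =====
def Spec_normalize_stock_code_for_match_py (code : Option String) (out : String) : Prop := out = normalize_stock_code_for_match_py_alt code
instance (code : Option String) (out : String) : Decidable (Spec_normalize_stock_code_for_match_py code out) := by unfold Spec_normalize_stock_code_for_match_py; infer_instance

-- ===== CLAIM (what is proved, stated in full; the proofs are below) =====
def Claim_equal_normalize_stock_code_for_match_py : Prop := ∀ (code : Option String), Dom_normalize_stock_code_for_match_py code → Spec_normalize_stock_code_for_match_py code (normalize_stock_code_for_match_py code)

-- ===== LEMMAS AND PROOFS =====

-- endswith by a 3-character pattern = "long enough and the last three characters are the pattern"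
lemma endswith_three (cs t : List Char) (ht : t.length = 3) :
    PySem.Chars.endswith cs t = true ↔ 3 ≤ cs.length ∧ cs.drop (cs.length - 3) = t := by
  rw [PySem.Chars.endswith_iff]
  constructor
  · intro h
    have hl : 3 ≤ cs.length := ht ▸ h.length_le
    refine ⟨hl, ?_⟩
    have := (List.suffix_iff_eq_drop).mp h
    rwa [ht, eq_comm] at this
  · rintro ⟨hl, hd⟩
    exact (List.suffix_iff_eq_drop).mpr (by rw [ht, ← hd])

-- the branch structures of the two ports compute the same list
lemma key_lemma (cs : List Char) :
    (if PySem.Chars.endswith cs ['.', 'S', 'Z'] then PySem.List.slice cs none (some (-3))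
     else if PySem.Chars.endswith cs ['.', 'S', 'H'] then PySem.List.slice cs none (some (-3))
     else if PySem.Chars.endswith cs ['.', 'B', 'J'] then PySem.List.slice cs none (some (-3))
     else cs)
    = (if 3 ≤ cs.length ∧
          (PySem.List.slice cs (some (-3)) none = ['.', 'S', 'Z'] ∨
           PySem.List.slice cs (some (-3)) none = ['.', 'S', 'H'] ∨
           PySem.List.slice cs (some (-3)) none = ['.', 'B', 'J'])
       then PySem.List.slice cs none (some (-3))
       else cs) := by
  rw [PySem.List.slice_from_neg_ofNat cs 3 (by omega)]
  have eZ := endswith_three cs ['.', 'S', 'Z'] rfl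
  have eH := endswith_three cs ['.', 'S', 'H'] rfl
  have eJ := endswith_three cs ['.', 'B', 'J'] rfl
  by_cases hl : 3 ≤ cs.length
  · by_cases h1 : cs.drop (cs.length - 3) = ['.', 'S', 'Z']
    · have tZ : PySem.Chars.endswith cs ['.', 'S', 'Z'] = true := eZ.mpr (And.intro hl h1)
      simp [tZ, hl, h1]
    · have fZ : PySem.Chars.endswith cs ['.', 'S', 'Z'] = false := by
        rw [Bool.eq_false_iff]; intro h; exact h1 (eZ.mp h).2
      by_cases h2 : cs.drop (cs.length - 3) = ['.', 'S', 'H']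
      · have tH : PySem.Chars.endswith cs ['.', 'S', 'H'] = true := eH.mpr (And.intro hl h2)
        simp [fZ, tH, hl, h2]
      · have fH : PySem.Chars.endswith cs ['.', 'S', 'H'] = false := by
          rw [Bool.eq_false_iff]; intro h; exact h2 (eH.mp h).2
        by_cases h3 : cs.drop (cs.length - 3) = ['.', 'B', 'J']
        · have tJ : PySem.Chars.endswith cs ['.', 'B', 'J'] = true := eJ.mpr (And.intro hl h3)
          simp [fZ, fH, tJ, hl, h3]
        · have fJ : PySem.Chars.endswith cs ['.', 'B', 'J'] = false := by
            rw [Bool.eq_false_iff]; intro h; exact h3 (eJ.mp h).2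
          simp [fZ, fH, fJ, h1, h2, h3]
  · have fZ : PySem.Chars.endswith cs ['.', 'S', 'Z'] = false := by
      rw [Bool.eq_false_iff]; intro h; exact hl (eZ.mp h).1
    have fH : PySem.Chars.endswith cs ['.', 'S', 'H'] = false := by
      rw [Bool.eq_false_iff]; intro h; exact hl (eH.mp h).1
    have fJ : PySem.Chars.endswith cs ['.', 'B', 'J'] = false := by
      rw [Bool.eq_false_iff]; intro h; exact hl (eJ.mp h).1
    simp [fZ, fH, fJ, hl]

-- B's per-character uppercase list is exactly the character list of A's s
lemma chars_eq (c : String) :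
    (PySem.Str.strip c).toList.map PySem.Chars.upperChar
      = (PySem.Str.upper (PySem.Str.strip c)).toList := by
  simp only [PySem.Str.toList_upper]
  rfl

-- ===== VERDICT (by name: the statement is the Claim_ definition above) =====
theorem normalize_stock_code_for_match_py_spec : Claim_equal_normalize_stock_code_for_match_py := by
  intro code _
  unfold Spec_normalize_stock_code_for_match_py normalize_stock_code_for_match_py normalize_stock_code_for_match_py_alt
  cases code with
  | none => rfl
  | some c =>
    by_cases hc : c = ""
    · simp [hc]
    · dsimp only
      rw [if_neg hc, if_neg hc, chars_eq]
      apply String.toList_inj.mp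
      rw [String.toList_ofList]
      simp only [apply_ite String.toList, PySem.Str.toList_slice,
        PySem.Chars.slice_eq_listSlice, PySem.Str.endswith_eq,
        show (".SZ" : String).toList = ['.', 'S', 'Z'] from rfl,
        show (".SH" : String).toList = ['.', 'S', 'H'] from rfl,
        show (".BJ" : String).toList = ['.', 'B', 'J'] from rfl]
      exact key_lemma (PySem.Str.upper (PySem.Str.strip c)).toList
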